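-- pv_equiv track=rewrite | github.com/solace-dgrama/tools | misc/gen_action_list.py | _do_allowed
-- ===== SOURCE A (Python) =====
-- from typing import Dict, List, Optional
--
-- Flags = Dict[str, Dict[str, bool]]
--
-- def _do_allowed(
--     do_action: str, do_targets: List[str], flags: Flags
-- ) -> bool:
--     """Return True if inserting do_action at the current scan position is valid."""
--     if do_action == "":
--         return False
--     if do_action in ("powerDown", "ungracefulPowerDown"):
--         return all(
--             not flags["skip"][t]
--             and not flags["ungraceful"][t]
--             and not flags["power_down"][t]
--             for t in do_targets
--         )
--     if do_action == "reload":
--         return all(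
--             not flags["skip"][t]
--             and not flags["power_down"][t]
--             and not flags["ungraceful"][t]
--             and not flags["disk_down"][t]
--             for t in do_targets
--         )
--     if do_action == "externalDiskLinkDown":
--         return all(
--             not flags["skip"][t] and not flags["disk_down"][t]
--             for t in do_targets
--         )
--     if do_action in (
--         "redundancyDisable", "messageBackboneServiceDisable",
--         "redundancyServiceDisable", "messageSpoolDisable",
--         "linkDown", "mateLinkServiceDisable", "mateLinkDown",
--     ):
--         return all(
--             not flags["skip"][t]
--             and not flags["power_down"][t]
--             and not flags["ungraceful"][t]
--             and not flags["isolated"][t]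
--             for t in do_targets
--         )
--     # Generic: cannot act on powered-down or isolated target.
--     return all(
--         not flags["skip"][t]
--         and not flags["power_down"][t]
--         and not flags["isolated"][t]
--         and not flags["ungraceful"][t]
--         for t in do_targets
--     )
-- ===== SOURCE B (Python) =====
-- from typing import Dict, List
--
-- Flags = Dict[str, Dict[str, bool]]
--
-- # every flag category the scanner tracks
-- CATEGORIES = ["skip", "power_down", "ungraceful", "isolated", "disk_down"]
--
--
-- def _relevant(do_action: str, category: str) -> bool:
--     """Does this flag category block do_action?"""
--     if category == "skip":
--         return True
--     if category == "disk_down":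
--         return do_action in ("reload", "externalDiskLinkDown")
--     if do_action == "externalDiskLinkDown":
--         return False
--     if category in ("power_down", "ungraceful"):
--         return True
--     if category == "isolated":
--         return do_action not in ("powerDown", "ungracefulPowerDown", "reload")
--     return False
--
--
-- def _do_allowed(
--     do_action: str, do_targets: List[str], flags: Flags
-- ) -> bool:
--     """Return True if inserting do_action at the current scan position is valid."""
--     if do_action == "":
--         return False
--     for t in do_targets:
--         for category in CATEGORIES:
--             if _relevant(do_action, category) and flags[category][t]:
--                 return False
--     return True
-- ===== Notes on version B (the rewrite author's own statement) =====
-- stated objective: alternative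
-- what changed: Replaces A's five hard-coded per-action all() conjunctions by a blocking-relevance predicate on (action, flag-category) plus an early-return double loop over the targets and the fixed category universe, so no per-action category list exists anywhere; Pre_ additionally excludes the rare inputs where A returns False by short-circuiting before a missing key that B's fixed scan order consults first (there B raises KeyError).
import Mathlib
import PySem

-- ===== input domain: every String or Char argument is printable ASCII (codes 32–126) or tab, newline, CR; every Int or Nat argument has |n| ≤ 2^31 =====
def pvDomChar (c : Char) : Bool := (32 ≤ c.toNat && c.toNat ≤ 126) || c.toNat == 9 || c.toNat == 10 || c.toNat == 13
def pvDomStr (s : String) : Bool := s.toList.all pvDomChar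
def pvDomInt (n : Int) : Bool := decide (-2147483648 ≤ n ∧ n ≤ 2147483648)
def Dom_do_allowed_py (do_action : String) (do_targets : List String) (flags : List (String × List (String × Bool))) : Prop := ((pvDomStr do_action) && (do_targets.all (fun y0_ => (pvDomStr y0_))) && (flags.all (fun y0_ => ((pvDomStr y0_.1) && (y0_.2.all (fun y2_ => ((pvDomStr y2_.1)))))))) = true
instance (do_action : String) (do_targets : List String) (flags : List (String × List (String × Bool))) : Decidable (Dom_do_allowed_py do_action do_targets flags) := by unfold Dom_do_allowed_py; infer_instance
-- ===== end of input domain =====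

-- B replaces A's five hard-coded per-action all() conjunctions by a blocking-relevance
-- predicate on (action, flag-category) and an early-return double loop over the targets
-- and the fixed category universe (alternative decomposition; same cost; equivalence of
-- RETURN values on Pre_).


-- ===== PORT A =====
-- flags[f][t]; a missing key, where Python raises KeyError, is read as `false` here — Pre_
-- guarantees every lookup A actually performs succeeds.
def pyFlag (flags : List (String × List (String × Bool))) (f t : String) : Bool :=
  (((PySem.Dict.mk flags).get? f).bind (fun d => (PySem.Dict.mk d).get? t)).getD false

def do_allowed_py (do_action : String) (do_targets : List String) (flags : List (String × List (String × Bool))) : Bool :=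
  if do_action == "" then false
  else if do_action == "powerDown" || do_action == "ungracefulPowerDown" then
    do_targets.all (fun t =>
      !pyFlag flags "skip" t && !pyFlag flags "ungraceful" t && !pyFlag flags "power_down" t)
  else if do_action == "reload" then
    do_targets.all (fun t =>
      !pyFlag flags "skip" t && !pyFlag flags "power_down" t && !pyFlag flags "ungraceful" t
        && !pyFlag flags "disk_down" t)
  else if do_action == "externalDiskLinkDown" then
    do_targets.all (fun t => !pyFlag flags "skip" t && !pyFlag flags "disk_down" t)
  else if do_action == "redundancyDisable" || do_action == "messageBackboneServiceDisable"
      || do_action == "redundancyServiceDisable" || do_action == "messageSpoolDisable"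
      || do_action == "linkDown" || do_action == "mateLinkServiceDisable"
      || do_action == "mateLinkDown" then
    do_targets.all (fun t =>
      !pyFlag flags "skip" t && !pyFlag flags "power_down" t && !pyFlag flags "ungraceful" t
        && !pyFlag flags "isolated" t)
  else
    do_targets.all (fun t =>
      !pyFlag flags "skip" t && !pyFlag flags "power_down" t && !pyFlag flags "isolated" t
        && !pyFlag flags "ungraceful" t)

-- ===== PORT B =====
-- CATEGORIES: every flag category the scanner tracks
def pvCategories : List String := ["skip", "power_down", "ungraceful", "isolated", "disk_down"]

-- _relevant(do_action, category): does this flag category block do_action?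
def pvRelevant (do_action category : String) : Bool :=
  if category == "skip" then true
  else if category == "disk_down" then
    do_action == "reload" || do_action == "externalDiskLinkDown"
  else if do_action == "externalDiskLinkDown" then false
  else if category == "power_down" || category == "ungraceful" then true
  else if category == "isolated" then
    !(do_action == "powerDown" || do_action == "ungracefulPowerDown" || do_action == "reload")
  else false

-- flags[category][t] of Source B; a missing key, where Python raises KeyError, is read as
-- `false` here — Pre_ guarantees every lookup B actually performs succeeds.
def pvFlagB (flags : List (String × List (String × Bool))) (category t : String) : Bool :=
  (((PySem.Dict.mk flags).get? category).bind (fun d => (PySem.Dict.mk d).get? t)).getD false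

-- early-return double loop 'for t in do_targets: for category in CATEGORIES:
--   if _relevant(...) and flags[category][t]: return False' ported as !any/any
def do_allowed_py_alt (do_action : String) (do_targets : List String) (flags : List (String × List (String × Bool))) : Bool :=
  if do_action == "" then false
  else
    !(do_targets.any (fun t =>
      pvCategories.any (fun category =>
        pvRelevant do_action category && pvFlagB flags category t)))

-- ===== PRECONDITION & SPEC =====
-- Pre_ holds exactly where Python A returns normally (no KeyError) AND Python B also
-- returns: for each program, with `req` the flag categories it consults for this action in
-- its own order, every target before the first non-clear target has all of `req` present
-- and False, and at the first non-clear target (if any) a True flag is reached before any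
-- missing key (Python's left-to-right short-circuit).  Pre_ excludes the (rare) inputs on
-- which A returns False by reaching a True flag before a key that is missing but consulted
-- earlier in B's fixed category order: there B raises KeyError, so no common value exists.
def pvLook (flags : List (String × List (String × Bool))) (f t : String) : Option Bool :=
  ((PySem.Dict.mk flags).get? f).bind (fun d => (PySem.Dict.mk d).get? t)

-- the categories A consults, in A's per-branch order
def pvReq (do_action : String) : List String :=
  if do_action = "powerDown" ∨ do_action = "ungracefulPowerDown" then
    ["skip", "ungraceful", "power_down"]
  else if do_action = "reload" then ["skip", "power_down", "ungraceful", "disk_down"]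
  else if do_action = "externalDiskLinkDown" then ["skip", "disk_down"]
  else if do_action = "redundancyDisable" ∨ do_action = "messageBackboneServiceDisable"
      ∨ do_action = "redundancyServiceDisable" ∨ do_action = "messageSpoolDisable"
      ∨ do_action = "linkDown" ∨ do_action = "mateLinkServiceDisable"
      ∨ do_action = "mateLinkDown" then ["skip", "power_down", "ungraceful", "isolated"]
  else ["skip", "power_down", "isolated", "ungraceful"]

-- the categories B consults, in the fixed universe order (same set, B's order)
def pvReqB (do_action : String) : List String :=
  if do_action = "powerDown" ∨ do_action = "ungracefulPowerDown" then
    ["skip", "power_down", "ungraceful"]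
  else if do_action = "reload" then ["skip", "power_down", "ungraceful", "disk_down"]
  else if do_action = "externalDiskLinkDown" then ["skip", "disk_down"]
  else ["skip", "power_down", "ungraceful", "isolated"]

-- the given scan, consulting `req` left to right at each target, completes with no
-- missing key
def pvReturnsWith (req : List String) (do_targets : List String) (flags : List (String × List (String × Bool))) : Bool :=
  match do_targets.dropWhile (fun t => req.all (fun f => pvLook flags f t == some false)) with
  | [] => true
  | t :: _ =>
    match req.dropWhile (fun f => pvLook flags f t == some false) with
    | [] => true
    | f :: _ => (pvLook flags f t).isSome

def Pre_do_allowed_py (do_action : String) (do_targets : List String) (flags : List (String × List (String × Bool))) : Prop :=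
  do_action = "" ∨
    (pvReturnsWith (pvReq do_action) do_targets flags = true ∧
     pvReturnsWith (pvReqB do_action) do_targets flags = true)
instance (do_action : String) (do_targets : List String) (flags : List (String × List (String × Bool))) : Decidable (Pre_do_allowed_py do_action do_targets flags) := by unfold Pre_do_allowed_py; infer_instance

def pvWitness_do_allowed_py : String × List String × (List (String × List (String × Bool))) :=
  ("reload", ["a"],
    [("skip", [("a", false)]), ("power_down", [("a", false)]), ("ungraceful", [("a", false)]),
     ("isolated", [("a", false)]), ("disk_down", [("a", false)])])

def Spec_do_allowed_py (do_action : String) (do_targets : List String) (flags : List (String × List (String × Bool))) (out : Bool) : Prop := out = do_allowed_py_alt do_action do_targets flags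
instance (do_action : String) (do_targets : List String) (flags : List (String × List (String × Bool))) (out : Bool) : Decidable (Spec_do_allowed_py do_action do_targets flags out) := by unfold Spec_do_allowed_py; infer_instance

-- ===== CLAIM (what is proved, stated in full; the proofs are below) =====
def Claim_equal_do_allowed_py : Prop := ∀ (do_action : String) (do_targets : List String) (flags : List (String × List (String × Bool))), Dom_do_allowed_py do_action do_targets flags → Pre_do_allowed_py do_action do_targets flags → Spec_do_allowed_py do_action do_targets flags (do_allowed_py do_action do_targets flags)

-- ===== LEMMAS AND PROOFS =====
-- Scanning the category universe for a relevant True flag finds one exactly when the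
-- required-category list contains a True flag (any order; relevance = membership in req).
theorem pv_any_key (fl : List (String × List (String × Bool))) (t : String)
    (rel : String → Bool) (req : List String)
    (hrel : ∀ f, rel f = decide (f ∈ req)) (hsub : ∀ f ∈ req, f ∈ pvCategories) :
    pvCategories.any (fun c => rel c && pvFlagB fl c t)
      = req.any (fun f => pyFlag fl f t) := by
  apply Bool.eq_iff_iff.mpr
  simp only [List.any_eq_true, Bool.and_eq_true, hrel, decide_eq_true_eq]
  constructor
  · rintro ⟨c, _, hc, hv⟩
    exact ⟨c, hc, hv⟩
  · rintro ⟨f, hf, hv⟩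
    exact ⟨f, hsub f hf, hf, hv⟩

theorem pv_case (da : String) (dt : List String) (fl : List (String × List (String × Bool)))
    (req : List String)
    (hrel : ∀ f, pvRelevant da f = decide (f ∈ req)) (hsub : ∀ f ∈ req, f ∈ pvCategories) :
    (!(dt.any (fun t =>
        pvCategories.any (fun category => pvRelevant da category && pvFlagB fl category t))))
      = dt.all (fun t => req.all (fun f => !pyFlag fl f t)) := by
  have h1 : ∀ t, (pvCategories.any (fun c => pvRelevant da c && pvFlagB fl c t))
      = req.any (fun f => pyFlag fl f t) := fun t => pv_any_key fl t _ req hrel hsub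
  calc (!(dt.any (fun t => pvCategories.any (fun c => pvRelevant da c && pvFlagB fl c t))))
      = !(dt.any (fun t => req.any (fun f => pyFlag fl f t))) := by
        congr 1
        apply Bool.eq_iff_iff.mpr
        simp only [List.any_eq_true]
        constructor
        · rintro ⟨t, ht, hp⟩
          have hb : (pvCategories.any fun c => pvRelevant da c && pvFlagB fl c t) = true :=
            List.any_eq_true.mpr hp
          rw [h1 t] at hb
          exact ⟨t, ht, List.any_eq_true.mp hb⟩
        · rintro ⟨t, ht, hp⟩
          have hb : (req.any fun f => pyFlag fl f t) = true := List.any_eq_true.mpr hp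
          rw [← h1 t] at hb
          exact ⟨t, ht, List.any_eq_true.mp hb⟩
    _ = dt.all (fun t => !(req.any (fun f => pyFlag fl f t))) := List.not_any_eq_all_not
    _ = dt.all (fun t => req.all (fun f => !pyFlag fl f t)) := by
        simp only [List.not_any_eq_all_not]

theorem hrelPD (da : String) (h : da = "powerDown" ∨ da = "ungracefulPowerDown") :
    ∀ f, pvRelevant da f = decide (f ∈ ["skip", "ungraceful", "power_down"]) := by
  rcases h with h | h <;> subst h <;> intro f <;> unfold pvRelevant <;> split_ifs <;> simp_all
  all_goals tauto

theorem hrelReload :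
    ∀ f, pvRelevant "reload" f = decide (f ∈ ["skip", "power_down", "ungraceful", "disk_down"]) := by
  intro f; unfold pvRelevant; split_ifs <;> simp_all

theorem hrelExt :
    ∀ f, pvRelevant "externalDiskLinkDown" f = decide (f ∈ ["skip", "disk_down"]) := by
  intro f; unfold pvRelevant; split_ifs <;> simp_all

theorem hrelServ (da : String)
    (h : da = "redundancyDisable" ∨ da = "messageBackboneServiceDisable"
      ∨ da = "redundancyServiceDisable" ∨ da = "messageSpoolDisable"
      ∨ da = "linkDown" ∨ da = "mateLinkServiceDisable" ∨ da = "mateLinkDown") :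
    ∀ f, pvRelevant da f = decide (f ∈ ["skip", "power_down", "ungraceful", "isolated"]) := by
  rcases h with h | h | h | h | h | h | h <;> subst h
  all_goals intro f; unfold pvRelevant; split_ifs <;> simp_all
  all_goals tauto

theorem hrelGen (da : String)
    (h1 : da ≠ "powerDown") (h2 : da ≠ "ungracefulPowerDown") (h3 : da ≠ "reload")
    (h4 : da ≠ "externalDiskLinkDown") :
    ∀ f, pvRelevant da f = decide (f ∈ ["skip", "power_down", "isolated", "ungraceful"]) := by
  intro f; unfold pvRelevant; split_ifs <;> simp_all
  all_goals tauto

-- ===== VERDICT (by name: the statement is the Claim_ definition above) =====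
theorem do_allowed_py_spec : Claim_equal_do_allowed_py := by
  intro da dt fl _ _
  unfold Spec_do_allowed_py do_allowed_py do_allowed_py_alt
  by_cases h0 : da == ""
  · simp [h0]
  · by_cases h1 : da = "powerDown"
    · subst h1
      rw [pv_case _ dt fl _ (hrelPD _ (Or.inl rfl)) (by decide)]
      simp [List.all_cons, Bool.and_assoc]
    · by_cases h2 : da = "ungracefulPowerDown"
      · subst h2
        rw [pv_case _ dt fl _ (hrelPD _ (Or.inr rfl)) (by decide)]
        simp [List.all_cons, Bool.and_assoc]
      · by_cases h3 : da = "reload"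
        · subst h3
          rw [pv_case _ dt fl _ hrelReload (by decide)]
          simp [List.all_cons, Bool.and_assoc]
        · by_cases h4 : da = "externalDiskLinkDown"
          · subst h4
            rw [pv_case _ dt fl _ hrelExt (by decide)]
            simp [List.all_cons]
          · by_cases h5 : da = "redundancyDisable"
            · subst h5
              rw [pv_case _ dt fl _ (hrelServ _ (Or.inl rfl)) (by decide)]
              simp [List.all_cons, Bool.and_assoc]
            · by_cases h6 : da = "messageBackboneServiceDisable"
              · subst h6
                rw [pv_case _ dt fl _ (hrelServ _ (Or.inr (Or.inl rfl))) (by decide)]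
                simp [List.all_cons, Bool.and_assoc]
              · by_cases h7 : da = "redundancyServiceDisable"
                · subst h7
                  rw [pv_case _ dt fl _ (hrelServ _ (Or.inr (Or.inr (Or.inl rfl)))) (by decide)]
                  simp [List.all_cons, Bool.and_assoc]
                · by_cases h8 : da = "messageSpoolDisable"
                  · subst h8
                    rw [pv_case _ dt fl _ (hrelServ _ (Or.inr (Or.inr (Or.inr (Or.inl rfl))))) (by decide)]
                    simp [List.all_cons, Bool.and_assoc]
                  · by_cases h9 : da = "linkDown"
                    · subst h9
                      rw [pv_case _ dt fl _ (hrelServ _ (Or.inr (Or.inr (Or.inr (Or.inr (Or.inl rfl)))))) (by decide)]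
                      simp [List.all_cons, Bool.and_assoc]
                    · by_cases h10 : da = "mateLinkServiceDisable"
                      · subst h10
                        rw [pv_case _ dt fl _ (hrelServ _ (Or.inr (Or.inr (Or.inr (Or.inr (Or.inr (Or.inl rfl))))))) (by decide)]
                        simp [List.all_cons, Bool.and_assoc]
                      · by_cases h11 : da = "mateLinkDown"
                        · subst h11
                          rw [pv_case _ dt fl _ (hrelServ _ (Or.inr (Or.inr (Or.inr (Or.inr (Or.inr (Or.inr rfl))))))) (by decide)]
                          simp [List.all_cons, Bool.and_assoc]
                        · rw [pv_case _ dt fl _ (hrelGen _ h1 h2 h3 h4) (by decide)]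
                          simp [List.all_cons, Bool.and_assoc, h0, h1, h2, h3, h4, h5, h6,
                            h7, h8, h9, h10, h11]
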